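-- pv_equiv track=rewrite | github.com/mathurkartik/AI-Travel-Agent | backend/app/agents/logistics.py | _allocate_nights
-- ===== SOURCE A (Python) =====
-- from typing import List, Optional, Dict
--
-- def _allocate_nights(cities: List[str], duration_days: int) -> Dict[str, int]:
--     """
--     Distribute nights across cities based on duration.
--
--     Simple allocation: first city gets remainder nights.
--     Phase 8: Could use LLM or scoring for smarter allocation.
--     """
--     if not cities:
--         return {}
--
--     base_nights = duration_days // len(cities)
--     remainder = duration_days % len(cities)
--
--     allocation = {}
--     for i, city in enumerate(cities):
--         # First cities get extra nights if there's remainder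
--         allocation[city] = base_nights + (1 if i < remainder else 0)
--
--     return allocation
-- ===== SOURCE B (Python) =====
-- def _allocate_nights(cities, duration_days):
--     """Greedy even split: repeatedly give the next city the ceiling of an
--     even share of the nights still unassigned, then remove it from the pool.
--     No base/remainder pair is ever computed; the running total does the work
--     (and ceiling division handles negative totals the same way)."""
--     if not cities:
--         return {}
--     allocation = {}
--     remaining = duration_days
--     for m in range(len(cities), 0, -1):   # m = cities still to serve
--         share = -(-remaining // m)        # ceil(remaining / m)
--         allocation[cities[len(cities) - m]] = share
--         remaining -= share
--     return allocation
-- ===== Notes on version B (the rewrite author's own statement) =====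
-- stated objective: alternative
-- what changed: B never computes the base/remainder pair: it keeps a running total of still-unassigned nights and greedily hands each city the ceiling of an even share of that total (share = -(-remaining // m)), subtracting as it goes, instead of A's fixed base + (1 if i < remainder) per-index formula.
import Mathlib
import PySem

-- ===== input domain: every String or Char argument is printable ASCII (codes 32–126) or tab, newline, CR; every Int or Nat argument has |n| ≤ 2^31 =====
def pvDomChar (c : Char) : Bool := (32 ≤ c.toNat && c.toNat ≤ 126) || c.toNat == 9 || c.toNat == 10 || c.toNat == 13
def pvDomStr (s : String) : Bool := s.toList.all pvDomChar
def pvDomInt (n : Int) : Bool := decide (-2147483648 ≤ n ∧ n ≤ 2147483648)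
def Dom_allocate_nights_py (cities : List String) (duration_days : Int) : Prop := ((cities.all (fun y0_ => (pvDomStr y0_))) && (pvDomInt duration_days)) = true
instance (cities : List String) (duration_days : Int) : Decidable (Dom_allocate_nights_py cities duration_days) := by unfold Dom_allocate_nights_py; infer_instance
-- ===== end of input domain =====

-- B replaces A's fixed base/remainder formula by a greedy even split: keep a running total of
-- still-unassigned nights and hand each city the ceiling of an even share of it (objective:
-- alternative; same exact result, duplicates and negative durations included).


-- ===== PORT A =====
def allocate_nights_py (cities : List String) (duration_days : Int) : List (String × Int) :=
  if cities = [] then []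
  else
    let n : Int := cities.length
    let base_nights := PySem.Int.floordiv duration_days n
    let remainder := PySem.Int.mod duration_days n
    ((PySem.List.enumerate cities 0).foldl
      (fun d (p : Int × String) => d.insert p.2 (base_nights + (if p.1 < remainder then 1 else 0)))
      PySem.Dict.empty).items

-- ===== PORT B =====
-- one iteration of 'for m in range(len(cities), 0, -1)':
--   share = -(-remaining // m); allocation[cities[len(cities) - m]] = share; remaining -= share
-- cities[len(cities)-m] is read with pyGet? (Python-exact; the none arm is the unreachable
-- IndexError case, 0 ≤ len-m < len here).
def pvStep (cities : List String) (st : PySem.Dict String Int × Int) (m : Int) :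
    PySem.Dict String Int × Int :=
  let share := -(PySem.Int.floordiv (-(st.2)) m)
  let d' := match PySem.List.pyGet? cities ((cities.length : Int) - m) with
            | some c => st.1.insert c share
            | none => st.1
  (d', st.2 - share)

def allocate_nights_py_alt (cities : List String) (duration_days : Int) : List (String × Int) :=
  if cities = [] then []
  else
    ((PySem.List.pyRange (cities.length : Int) 0 (-1)).foldl (pvStep cities)
      (PySem.Dict.empty, duration_days)).1.items

-- ===== PRECONDITION & SPEC =====
def Spec_allocate_nights_py (cities : List String) (duration_days : Int) (out : List (String × Int)) : Prop := out = allocate_nights_py_alt cities duration_days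
instance (cities : List String) (duration_days : Int) (out : List (String × Int)) : Decidable (Spec_allocate_nights_py cities duration_days out) := by unfold Spec_allocate_nights_py; infer_instance

-- ===== CLAIM (what is proved, stated in full; the proofs are below) =====
def Claim_equal_allocate_nights_py : Prop := ∀ (cities : List String) (duration_days : Int), Dom_allocate_nights_py cities duration_days → Spec_allocate_nights_py cities duration_days (allocate_nights_py cities duration_days)

-- ===== LEMMAS AND PROOFS =====

-- the nights still unassigned when k cities remain to be served
def pvRem (D base rem n k : Int) : Int := D - (n - k) * base - min (n - k) rem

-- the share B computes when k cities remain equals A's per-index value,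
-- and the remaining total steps down accordingly
theorem pvShare (D base rem n k : Int) (hk0 : 0 < k)
    (hD : base * n + rem = D) (hrn : rem < n) :
    -(PySem.Int.floordiv (-(pvRem D base rem n k)) k)
      = base + (if n - k < rem then 1 else 0) ∧
    pvRem D base rem n k - (base + (if n - k < rem then 1 else 0))
      = pvRem D base rem n (k - 1) := by
  by_cases hc : n - k < rem
  · have hmin : min (n - k) rem = n - k := min_eq_left hc.le
    have hmin' : min (n - (k - 1)) rem = n - (k - 1) := min_eq_left (by omega)
    have ha : D - (n - k) * base - (n - k) = base * k + (rem - (n - k)) := by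
      rw [← hD]; ring
    simp only [pvRem, hmin, hmin', if_pos hc]
    refine ⟨?_, by rw [← hD]; ring⟩
    rw [PySem.Int.neg_floordiv_neg_eq_iff_of_pos hk0, ha]
    have e1 : (base + 1 - 1) * k = base * k := by ring
    have e2 : (base + 1) * k = base * k + k := by ring
    rw [e1, e2]
    omega
  · have hmin : min (n - k) rem = rem := min_eq_right (by omega)
    have hmin' : min (n - (k - 1)) rem = rem := min_eq_right (by omega)
    have ha : D - (n - k) * base - rem = base * k := by rw [← hD]; ring
    simp only [pvRem, hmin, hmin', if_neg hc, add_zero]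
    refine ⟨?_, by rw [← hD]; ring⟩
    rw [PySem.Int.neg_floordiv_neg_eq_iff_of_pos hk0, ha]
    have e1 : (base - 1) * k = base * k - k := by ring
    rw [e1]
    omega

-- the whole countdown loop, by induction on the number of cities still to serve
theorem pvLoop (cities : List String) (D base rem : Int)
    (hD : base * (cities.length : Int) + rem = D)
    (hrn : rem < (cities.length : Int)) :
    ∀ (M : Nat), M ≤ cities.length → ∀ (d0 : PySem.Dict String Int),
    (PySem.List.pyRange (M : Int) 0 (-1)).foldl (pvStep cities)
        (d0, pvRem D base rem (cities.length : Int) (M : Int))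
      = ((PySem.List.enumerate (cities.drop (cities.length - M))
            ((cities.length - M : Nat) : Int)).foldl
          (fun d (p : Int × String) => d.insert p.2 (base + (if p.1 < rem then 1 else 0))) d0,
         pvRem D base rem (cities.length : Int) 0) := by
  intro M
  induction M with
  | zero =>
    intro _ d0
    rw [PySem.List.pyRange_neg_one_eq_nil (by norm_num)]
    simp [PySem.List.enumerate_nil]
  | succ M ih =>
    intro hM d0
    have hMi : ((M : Int) + 1) ≤ (cities.length : Int) := by exact_mod_cast hM
    have hcast : ((M + 1 : Nat) : Int) = (M : Int) + 1 := by push_cast; ring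
    rw [hcast, PySem.List.pyRange_neg_one_cons (by positivity),
        show (M : Int) + 1 - 1 = (M : Int) by ring, List.foldl_cons]
    obtain ⟨hsh, hrm⟩ := pvShare D base rem (cities.length : Int) ((M : Int) + 1)
      (by positivity) hD hrn
    have hi : cities.length - (M + 1) < cities.length := by omega
    have hidx : (cities.length : Int) - ((M : Int) + 1)
        = ((cities.length - (M + 1) : Nat) : Int) := by omega
    have hget : PySem.List.pyGet? cities ((cities.length - (M + 1) : Nat) : Int)
        = some (cities[cities.length - (M + 1)]'hi) := by
      rw [PySem.List.pyGet?_natCast, List.getElem?_eq_getElem hi]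
    rw [show (M : Int) + 1 - 1 = (M : Int) by ring] at hrm
    rw [hidx] at hsh hrm
    have hstep : pvStep cities (d0, pvRem D base rem (cities.length : Int) ((M : Int) + 1))
          ((M : Int) + 1)
        = (d0.insert (cities[cities.length - (M + 1)]'hi)
             (base + (if ((cities.length - (M + 1) : Nat) : Int) < rem then 1 else 0)),
           pvRem D base rem (cities.length : Int) (M : Int)) := by
      simp only [pvStep, hidx, hsh, hget, hrm]
    rw [hstep, ih (by omega)]
    have hdrop := List.drop_eq_getElem_cons hi
    rw [show cities.length - (M + 1) + 1 = cities.length - M from by omega] at hdrop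
    have hsucc : ((cities.length - (M + 1) : Nat) : Int) + 1
        = ((cities.length - M : Nat) : Int) := by omega
    rw [hdrop, PySem.List.enumerate_cons, List.foldl_cons, hsucc]

-- ===== VERDICT (by name: the statement is the Claim_ definition above) =====
theorem allocate_nights_py_spec : Claim_equal_allocate_nights_py := by
  intro cities duration_days _
  unfold Spec_allocate_nights_py allocate_nights_py allocate_nights_py_alt
  by_cases hc : cities = []
  · simp [hc]
  · simp only [if_neg hc]
    have hn : (0 : Int) < (cities.length : Int) := by
      have := List.length_pos_iff.mpr hc; exact_mod_cast this
    set base := PySem.Int.floordiv duration_days (cities.length : Int) with hbase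
    set rem := PySem.Int.mod duration_days (cities.length : Int) with hrem
    have hD : base * (cities.length : Int) + rem = duration_days :=
      PySem.Int.floordiv_mul_add_mod duration_days (cities.length : Int)
    have hr0 : 0 ≤ rem := PySem.Int.mod_nonneg duration_days hn
    have hrn : rem < (cities.length : Int) := PySem.Int.mod_lt duration_days hn
    have hRn : pvRem duration_days base rem (cities.length : Int) (cities.length : Int)
        = duration_days := by
      simp only [pvRem]
      rw [min_eq_left (by omega)]
      ring
    have := pvLoop cities duration_days base rem hD hrn cities.length le_rfl
      PySem.Dict.empty
    rw [hRn] at this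
    rw [this]
    simp
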